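-- pv_equiv track=rewrite | github.com/lfq0404/AutoTemplate | services/block_service.py | _get_broken_sentences
-- ===== SOURCE A (Python) =====
-- def _get_broken_sentences(block_cut):
--     """
--     将block_cut断句
--     默认以 x 属性断句
--     :param block_cut:
--     :return:
--     """
--     sentences_tmp = [[]]
--     for b in block_cut:
--         sentences_tmp[-1].append(b)
--         if b[1] == 'x':
--             sentences_tmp.append([])
--
--     sentences_tmp = [i for i in sentences_tmp if i]
--     return sentences_tmp
-- ===== SOURCE B (Python) =====
-- def _get_broken_sentences(block_cut):
--     """Index-table-and-slice strategy: record each 'x' boundary position,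
--     emit slices between boundaries, then the nonempty tail."""
--     sentences = []
--     start = 0
--     for i, b in enumerate(block_cut):
--         if b[1] == 'x':
--             sentences.append(block_cut[start:i + 1])
--             start = i + 1
--     rest = block_cut[start:]
--     if rest:
--         sentences.append(rest)
--     return sentences
-- ===== Notes on version B (the rewrite author's own statement) =====
-- stated objective: alternative
-- what changed: Replaces A's grow-the-last-bucket accumulation plus a final filter pass with a boundary-index scan that emits block_cut[start:i+1] slices at each 'x' marker and appends the nonempty tail.
import Mathlib
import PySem

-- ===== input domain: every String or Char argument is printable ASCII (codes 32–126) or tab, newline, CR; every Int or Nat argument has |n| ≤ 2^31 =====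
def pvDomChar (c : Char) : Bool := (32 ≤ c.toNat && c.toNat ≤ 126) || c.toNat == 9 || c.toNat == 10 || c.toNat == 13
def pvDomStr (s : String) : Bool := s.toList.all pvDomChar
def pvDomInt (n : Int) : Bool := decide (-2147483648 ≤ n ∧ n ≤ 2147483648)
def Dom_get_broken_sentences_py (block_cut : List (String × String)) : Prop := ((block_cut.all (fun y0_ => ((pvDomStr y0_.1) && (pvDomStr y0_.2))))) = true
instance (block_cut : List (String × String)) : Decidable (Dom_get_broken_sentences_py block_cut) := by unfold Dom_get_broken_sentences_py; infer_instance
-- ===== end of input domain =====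

-- B is an alternative exact re-implementation: instead of A's grow-the-last-bucket
-- accumulation plus a final filter, it scans for 'x' boundary indices and emits slices.

-- ===== PORT A =====
-- one loop iteration of A: sentences_tmp[-1].append(b); if b[1]=='x': sentences_tmp.append([])
def aStep (st : List (List (String × String))) (b : String × String) :
    List (List (String × String)) :=
  let st' := st.dropLast ++ [st.getLastD [] ++ [b]]
  if b.2 == "x" then st' ++ [[]] else st'

def get_broken_sentences_py (block_cut : List (String × String)) :
    List (List (String × String)) :=
  let sentences_tmp := block_cut.foldl aStep [[]]
  sentences_tmp.filter (fun i => !i.isEmpty)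

-- ===== PORT B =====
-- one loop iteration of B: if b[1]=='x': sentences.append(block_cut[start:i+1]); start = i+1
def bStep (block_cut : List (String × String))
    (st : List (List (String × String)) × Int) (ib : Int × (String × String)) :
    List (List (String × String)) × Int :=
  if ib.2.2 == "x" then
    (st.1 ++ [PySem.List.slice block_cut (some st.2) (some (ib.1 + 1))], ib.1 + 1)
  else st

def get_broken_sentences_py_alt (block_cut : List (String × String)) :
    List (List (String × String)) :=
  let r := (PySem.List.enumerate block_cut 0).foldl (bStep block_cut) ([], 0)
  let rest := PySem.List.slice block_cut (some r.2) none
  if rest.isEmpty then r.1 else r.1 ++ [rest]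

-- ===== PRECONDITION & SPEC =====
def Spec_get_broken_sentences_py (block_cut : List (String × String)) (out : List (List (String × String))) : Prop := out = get_broken_sentences_py_alt block_cut
instance (block_cut : List (String × String)) (out : List (List (String × String))) : Decidable (Spec_get_broken_sentences_py block_cut out) := by unfold Spec_get_broken_sentences_py; infer_instance

-- ===== CLAIM (what is proved, stated in full; the proofs are below) =====
def Claim_equal_get_broken_sentences_py : Prop := ∀ (block_cut : List (String × String)), Dom_get_broken_sentences_py block_cut → Spec_get_broken_sentences_py block_cut (get_broken_sentences_py block_cut)

-- ===== LEMMAS AND PROOFS =====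

-- reference grouping function: grpF cur ys = the sentences of cur ++ ys, where cur is the
-- pending (not yet closed) sentence
def grpF (cur : List (String × String)) : List (String × String) → List (List (String × String))
  | [] => if cur.isEmpty then [] else [cur]
  | b :: rest => if b.2 == "x" then (cur ++ [b]) :: grpF [] rest else grpF (cur ++ [b]) rest

lemma aStep_concat (acc : List (List (String × String))) (cur : List (String × String))
    (b : String × String) :
    aStep (acc ++ [cur]) b =
      if b.2 == "x" then (acc ++ [cur ++ [b]]) ++ [[]] else acc ++ [cur ++ [b]] := by
  simp [aStep]

lemma A_inv : ∀ (ys : List (String × String)) (acc : List (List (String × String)))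
    (cur : List (String × String)),
    (ys.foldl aStep (acc ++ [cur])).filter (fun i => !i.isEmpty)
      = acc.filter (fun i => !i.isEmpty) ++ grpF cur ys := by
  intro ys
  induction ys with
  | nil =>
      intro acc cur
      simp only [List.foldl_nil, grpF, List.filter_append]
      by_cases h : cur.isEmpty <;> simp [h]
  | cons b rest ih =>
      intro acc cur
      simp only [List.foldl_cons, aStep_concat, grpF]
      by_cases h : b.2 == "x"
      · simp only [h, if_pos]
        rw [show (acc ++ [cur ++ [b]]) ++ [[]] = (acc ++ [cur ++ [b]]) ++ [([] : List (String × String))] from rfl]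
        rw [ih (acc ++ [cur ++ [b]]) []]
        simp
      · simp only [h, if_neg, Bool.false_eq_true, not_false_iff]
        rw [ih acc (cur ++ [b])]

lemma A_eq_grpF (xs : List (String × String)) :
    get_broken_sentences_py xs = grpF [] xs := by
  have := A_inv xs [] []
  simpa [get_broken_sentences_py] using this

-- slice with natural bounds as drop/take
lemma slice_nat (xs : List (String × String)) (a b : Nat) :
    PySem.List.slice xs (some (a : Int)) (some (b : Int)) = (xs.drop a).take (b - a) :=
  PySem.List.slice_natCast xs a b

lemma slice_step (xs : List (String × String)) (s j : Nat) (hsj : s ≤ j)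
    (hj : j < xs.length) :
    PySem.List.slice xs (some (s : Int)) (some ((j : Int) + 1))
      = PySem.List.slice xs (some (s : Int)) (some (j : Int)) ++ [xs[j]] := by
  have h1 : ((j : Int) + 1) = ((j + 1 : Nat) : Int) := by push_cast; ring
  rw [h1, slice_nat, slice_nat]
  have h2 : j + 1 - s = (j - s) + 1 := by omega
  rw [h2, List.take_add_one]
  have h3 : (xs.drop s)[j - s]? = some xs[j] := by
    rw [List.getElem?_drop]
    have : s + (j - s) = j := by omega
    rw [this, List.getElem?_eq_getElem hj]
  simp [h3]

-- final step of B: append the nonempty tail slice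
def finB (xs : List (String × String)) (r : List (List (String × String)) × Int) :
    List (List (String × String)) :=
  let rest := PySem.List.slice xs (some r.2) none
  if rest.isEmpty then r.1 else r.1 ++ [rest]

lemma B_inv (xs : List (String × String)) :
    ∀ (ys : List (String × String)) (j : Nat) (sents : List (List (String × String)))
      (s : Nat), s ≤ j → xs.drop j = ys →
    finB xs ((PySem.List.enumerate ys (j : Int)).foldl (bStep xs) (sents, (s : Int)))
      = sents ++ grpF (PySem.List.slice xs (some (s : Int)) (some (j : Int))) ys := by
  intro ys
  induction ys with
  | nil =>
      intro j sents s hsj hdrop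
      have hlen : xs.length <= j := by
        by_contra h
        have hne : xs.drop j ≠ [] := by
          simp [List.drop_eq_nil_iff]; omega
        exact hne hdrop
      have hfrom : PySem.List.slice xs (some (s : Int)) none = xs.drop s := by
        rw [PySem.List.slice_from_natCast]
      have hpend : PySem.List.slice xs (some (s : Int)) (some (j : Int)) = xs.drop s := by
        rw [slice_nat]
        apply List.take_of_length_le
        simp; omega
      simp only [PySem.List.enumerate, List.foldl_nil, grpF, finB, hfrom, hpend]
      by_cases h : (xs.drop s).isEmpty <;> simp [h]
  | cons b rest ih =>
      intro j sents s hsj hdrop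
      have hj : j < xs.length := by
        by_contra h
        rw [List.drop_eq_nil_iff.mpr (by omega)] at hdrop
        exact (List.cons_ne_nil b rest) hdrop.symm
      have hb : xs[j] = b := by
        have h0 : (xs.drop j)[0]? = some b := by rw [hdrop]; rfl
        rw [List.getElem?_drop] at h0
        simpa [List.getElem?_eq_getElem hj] using h0
      have hrest : xs.drop (j + 1) = rest := by
        have h1 : (xs.drop j).drop 1 = rest := by rw [hdrop]; rfl
        simpa [List.drop_drop] using h1
      have hc : ((j : Int) + 1) = ((j + 1 : Nat) : Int) := by push_cast; ring
      have hsl : PySem.List.slice xs (some (s : Int)) (some ((j + 1 : Nat) : Int))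
          = PySem.List.slice xs (some (s : Int)) (some (j : Int)) ++ [b] := by
        have h2 := slice_step xs s j hsj hj
        rw [hb] at h2
        rw [← h2]
        congr 1
      rw [PySem.List.enumerate_cons]
      simp only [List.foldl_cons]
      by_cases h : b.2 == "x"
      · have hstep : bStep xs (sents, (s : Int)) ((j : Int), b)
            = (sents ++ [PySem.List.slice xs (some (s : Int)) (some ((j : Int) + 1))], (j : Int) + 1) := by
          simp [bStep, h]
        rw [hstep, hc]
        rw [ih (j + 1) (sents ++ [PySem.List.slice xs (some (s : Int)) (some (((j + 1 : Nat)) : Int))]) (j + 1) (le_refl _) hrest]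
        have hpend0 : PySem.List.slice xs (some ((j + 1 : Nat) : Int)) (some ((j + 1 : Nat) : Int)) = [] := by
          rw [slice_nat]; simp
        rw [hpend0, hsl]
        simp [grpF, h]
      · have hstep : bStep xs (sents, (s : Int)) ((j : Int), b) = (sents, (s : Int)) := by
          simp [bStep, h]
        rw [hstep, hc]
        rw [ih (j + 1) sents s (by omega) hrest]
        rw [hsl]
        simp [grpF, h]

lemma B_eq_grpF (xs : List (String × String)) :
    get_broken_sentences_py_alt xs = grpF [] xs := by
  have h := B_inv xs xs 0 [] 0 (le_refl _) (by simp)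
  have hpend : PySem.List.slice xs (some ((0 : Nat) : Int)) (some ((0 : Nat) : Int)) = [] := by
    rw [slice_nat]; simp
  rw [hpend] at h
  simpa [get_broken_sentences_py_alt, finB] using h

-- ===== VERDICT (by name: the statement is the Claim_ definition above) =====
theorem get_broken_sentences_py_spec : Claim_equal_get_broken_sentences_py := by
  intro block_cut _
  unfold Spec_get_broken_sentences_py
  rw [A_eq_grpF, B_eq_grpF]
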